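-- pv_equiv track=rewrite | github.com/Santares/LeetCodeProblems | 1338. Reduce Array Size to The Half/1338.py | minSetSize2
-- ===== SOURCE A (Python) =====
-- from typing import List
-- from collections import Counter
--
-- def minSetSize2(arr: List[int]) -> int:
--     length = len(arr)
--     dic = Counter(arr).most_common()
--     newLen = length
--     res = 0
--     for key, count in dic:
--         newLen -= count
--         res += 1
--         if newLen <= (length + 1) // 2:
--             return res
--
--     return res
-- ===== SOURCE B (Python) =====
-- from collections import Counter
--
-- def minSetSize2(arr):
--     length = len(arr)
--     counts = Counter(arr)
--     buckets = Counter(counts.values())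
--     maxf = 0
--     for f in counts.values():
--         maxf = max(maxf, f)
--     half = (length + 1) // 2
--     remaining = length
--     res = 0
--     f = maxf
--     while f > 0:
--         for _ in range(buckets[f]):
--             remaining -= f
--             res += 1
--             if remaining <= half:
--                 return res
--         f -= 1
--     return res
-- ===== Notes on version B (the rewrite author's own statement) =====
-- stated objective: alternative
-- what changed: Replaces most_common()'s comparison sort of the distinct values by frequency-indexed buckets traversed from the highest frequency downward; it trades the sort for a linear bucket scan, at similar measured cost.
import Mathlib
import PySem

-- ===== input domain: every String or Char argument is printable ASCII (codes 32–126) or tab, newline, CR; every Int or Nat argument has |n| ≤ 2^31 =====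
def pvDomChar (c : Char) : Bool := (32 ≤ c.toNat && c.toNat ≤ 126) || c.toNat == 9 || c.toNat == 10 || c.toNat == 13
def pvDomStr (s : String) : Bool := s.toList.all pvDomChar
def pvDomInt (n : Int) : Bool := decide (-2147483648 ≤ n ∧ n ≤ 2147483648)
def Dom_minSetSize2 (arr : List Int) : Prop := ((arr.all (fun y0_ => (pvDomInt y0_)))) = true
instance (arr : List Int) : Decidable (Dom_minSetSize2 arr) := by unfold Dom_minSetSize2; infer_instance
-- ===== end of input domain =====

-- B replaces most_common()'s sort by frequency buckets scanned from the top frequency down (no sort).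

-- ===== PORT A =====
-- the 'for key, count in dic' loop with its early return
def minSetSize2Loop (length : Int) : List (Int × Int) → Int → Int → Int
  | [], _, res => res
  | (_, count) :: rest, newLen, res =>
    let newLen := newLen - count
    let res := res + 1
    if newLen ≤ PySem.Int.floordiv (length + 1) 2 then res
    else minSetSize2Loop length rest newLen res

def minSetSize2 (arr : List Int) : Int :=
  let length : Int := PySem.List.len arr
  -- Counter(arr).most_common() = sorted(items, key=itemgetter(1), reverse=True), a stable sort
  let dic := PySem.List.sorted (PySem.Dict.counter arr).items (fun kv => kv.2) true
  minSetSize2Loop length dic length 0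

-- ===== PORT B =====
-- the 'for _ in range(buckets[f])' loop: (some res) means the early return fired
def altInner (half f : Int) : Nat → Int → Int → Option Int × Int × Int
  | 0, remaining, res => (none, remaining, res)
  | k + 1, remaining, res =>
    let remaining := remaining - f
    let res := res + 1
    if remaining ≤ half then (some res, remaining, res)
    else altInner half f k remaining res

-- the 'while f > 0: …; f -= 1' loop, f = fk as it counts down
def altOuter (half : Int) (buckets : PySem.Dict Int Int) : Nat → Int → Int → Int
  | 0, _, res => res
  | fk + 1, remaining, res =>
    match altInner half ((fk : Int) + 1) ((buckets.getD ((fk : Int) + 1) 0).toNat) remaining res with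
    | (some r, _, _) => r
    | (none, remaining', res') => altOuter half buckets fk remaining' res'

def minSetSize2_alt (arr : List Int) : Int :=
  let length : Int := PySem.List.len arr
  let counts := PySem.Dict.counter arr
  let buckets := PySem.Dict.counter counts.values
  let maxf := counts.values.foldl max 0
  let half := PySem.Int.floordiv (length + 1) 2
  altOuter half buckets maxf.toNat length 0

-- ===== PRECONDITION & SPEC =====
def Spec_minSetSize2 (arr : List Int) (out : Int) : Prop := out = minSetSize2_alt arr
instance (arr : List Int) (out : Int) : Decidable (Spec_minSetSize2 arr out) := by unfold Spec_minSetSize2; infer_instance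

-- ===== CLAIM (what is proved, stated in full; the proofs are below) =====
def Claim_equal_minSetSize2 : Prop := ∀ (arr : List Int), Dom_minSetSize2 arr → Spec_minSetSize2 arr (minSetSize2 arr)

-- ===== LEMMAS AND PROOFS =====

-- the common greedy skeleton: both loops, read as a run over the bare list of counts
def greedy (half : Int) : List Int → Int → Int → Int
  | [], _, res => res
  | c :: t, rem, res =>
    if rem - c ≤ half then res + 1 else greedy half t (rem - c) (res + 1)

-- B's descending count sequence: buckets[m] copies of m, then buckets[m-1] copies of m-1, …
def descSeq (b : PySem.Dict Int Int) : Nat → List Int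
  | 0 => []
  | fk + 1 => List.replicate ((b.getD ((fk : Int) + 1) 0).toNat) ((fk : Int) + 1) ++ descSeq b fk

theorem loopA_eq_greedy (length : Int) (l : List (Int × Int)) (rem res : Int) :
    minSetSize2Loop length l rem res
      = greedy (PySem.Int.floordiv (length + 1) 2) (l.map Prod.snd) rem res := by
  induction l generalizing rem res with
  | nil => rfl
  | cons p t ih =>
    obtain ⟨k, c⟩ := p
    simp only [minSetSize2Loop, greedy, List.map_cons]
    split_ifs with h <;> simp [ih]

theorem inner_eq_greedy (half f : Int) (k : Nat) (rem res : Int) (tail : List Int) :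
    greedy half (List.replicate k f ++ tail) rem res
      = match altInner half f k rem res with
        | (some r, _, _) => r
        | (none, rem', res') => greedy half tail rem' res' := by
  induction k generalizing rem res with
  | zero => rfl
  | succ k ih =>
    simp only [List.replicate_succ, List.cons_append, greedy, altInner]
    split_ifs with h
    · rfl
    · exact ih _ _

theorem outer_eq_greedy (half : Int) (b : PySem.Dict Int Int) (m : Nat) (rem res : Int) :
    altOuter half b m rem res = greedy half (descSeq b m) rem res := by
  induction m generalizing rem res with
  | zero => rfl
  | succ fk ih =>
    simp only [altOuter, descSeq]
    rw [inner_eq_greedy]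
    cases h : altInner half ((fk : Int) + 1) ((b.getD ((fk : Int) + 1) 0).toNat) rem res with
    | mk o p =>
      cases o with
      | some r => rfl
      | none => exact ih _ _

theorem count_descSeq (b : PySem.Dict Int Int) (m : Nat) (a : Int) :
    (descSeq b m).count a
      = if 1 ≤ a ∧ a ≤ (m : Int) then (b.getD a 0).toNat else 0 := by
  induction m with
  | zero =>
    simp only [descSeq, List.count_nil]
    rw [if_neg (by omega)]
  | succ fk ih =>
    simp only [descSeq, List.count_append, List.count_replicate, ih, beq_iff_eq]
    by_cases ha : a = (fk : Int) + 1
    · subst ha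
      rw [if_pos rfl, if_neg (by omega), if_pos (by constructor <;> omega)]
      omega
    · rw [if_neg (by omega)]
      by_cases hc : 1 ≤ a ∧ a ≤ (fk : Int)
      · rw [if_pos hc, if_pos (by omega)]
        omega
      · rw [if_neg hc, if_neg (by omega)]

theorem mem_descSeq (b : PySem.Dict Int Int) (m : Nat) (a : Int) (h : a ∈ descSeq b m) :
    1 ≤ a ∧ a ≤ (m : Int) := by
  induction m with
  | zero => simp [descSeq] at h
  | succ fk ih =>
    simp only [descSeq, List.mem_append, List.mem_replicate] at h
    rcases h with ⟨-, rfl⟩ | h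
    · push_cast; omega
    · have := ih h
      push_cast
      omega

theorem pairwise_descSeq (b : PySem.Dict Int Int) (m : Nat) :
    (descSeq b m).Pairwise (· ≥ ·) := by
  induction m with
  | zero => simp [descSeq]
  | succ fk ih =>
    simp only [descSeq]
    refine List.pairwise_append.mpr ⟨?_, ih, ?_⟩
    · apply List.pairwise_replicate.mpr
      exact Or.inr le_rfl
    · intro x hx y hy
      obtain ⟨-, rfl⟩ := (List.mem_replicate).mp hx
      have := mem_descSeq b fk y hy
      omega

theorem perm_descSeq (vals : List Int) (m : Nat)
    (hv : ∀ v ∈ vals, 1 ≤ v ∧ v ≤ (m : Int)) :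
    (descSeq (PySem.Dict.counter vals) m).Perm vals := by
  rw [List.perm_iff_count]
  intro a
  rw [count_descSeq, PySem.Dict.getD_counter]
  split_ifs with h
  · simp
  · symm
    rw [List.count_eq_zero]
    intro ha
    exact h (hv a ha)

-- ===== VERDICT (by name: the statement is the Claim_ definition above) =====
theorem minSetSize2_spec : Claim_equal_minSetSize2 := by
  intro arr _
  unfold Spec_minSetSize2 minSetSize2 minSetSize2_alt
  rw [loopA_eq_greedy, outer_eq_greedy]
  congr 1
  -- the two descending count sequences coincide
  set vals : List Int := (PySem.Dict.counter arr).values with hvals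
  set m : Nat := (vals.foldl max 0).toNat with hm
  have hmax := PySem.List.le_foldl_max vals 0
  have hvals_eq : vals = (PySem.Set.ofList arr).map (fun k => (arr.count k : Int)) := by
    rw [hvals]
    show ((PySem.Dict.counter arr).items).map Prod.snd = _
    rw [PySem.Dict.items_counter, List.map_map]
    rfl
  have hbound : ∀ v ∈ vals, 1 ≤ v ∧ v ≤ (m : Int) := by
    intro v hvmem
    constructor
    · rw [hvals_eq] at hvmem
      obtain ⟨k, hk, rfl⟩ := List.mem_map.mp hvmem
      have : k ∈ arr := (PySem.Set.mem_ofList _ _).mp hk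
      have := List.count_pos_iff.mpr this
      omega
    · have h1 := hmax.2 v hvmem
      have h0 := hmax.1
      omega
  have p1 : ((PySem.List.sorted (PySem.Dict.counter arr).items (fun kv => kv.2) true).map Prod.snd).Perm vals := by
    rw [hvals]
    exact (PySem.List.sorted_perm _ _ _).map Prod.snd
  have p2 := perm_descSeq vals m hbound
  refine (p1.trans p2.symm).eq_of_pairwise (fun x y _ _ h1 h2 => le_antisymm h2 h1) ?_ ?_
  · -- sorted output is weakly decreasing in the key
    have := PySem.List.sorted_pairwise_rev (xs := (PySem.Dict.counter arr).items) (key := fun kv => kv.2)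
    rw [List.pairwise_map]
    exact this
  · exact pairwise_descSeq _ m
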